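-- pv_equiv track=rewrite | github.com/cvicky/Brackets | brackets.py | solution
-- ===== SOURCE A (Python) =====
-- def solution(S):
--     #if given an empty string
--     if len(S) == 0:
--         return 0
--
--     closedCount = 0
--     openCount = 0
--
--     #first pass, count total closed brackets
--     for i in S:
--         if i == ')':
--             closedCount += 1
--
--     #if not empty string and closedCount=0, then it's all open brackets, return 0
--     if closedCount == 0 and len(S) != 0:
--         return 0
--
--     #second pass, count open brackets, stop when # of open brackets = # of closed brackets
--     for index in range(0,len(S) ):
--         if S[index] == '(':
--             openCount += 1
--         elif S[index] == ')': #decrement the closed bracket count remaining on the right half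
--             closedCount -= 1
--         if openCount == closedCount:
--             break
--     return index + 1
-- ===== SOURCE B (Python) =====
-- def solution(S):
--     T = S.count(')')
--     if T == 0:
--         return 0
--     pos = [i for i, c in enumerate(S) if c in '()']
--     return pos[T - 1] + 1
-- ===== Notes on version B (the rewrite author's own statement) =====
-- stated objective: simpler
-- what changed: Replaces the dual open/closed counter loop with a break by a one-shot table of bracket positions: since A's loop stops exactly at the T-th bracket character (T = count of ')'), B returns pos[T-1]+1 from the enumerate-filter list.
import Mathlib
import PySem

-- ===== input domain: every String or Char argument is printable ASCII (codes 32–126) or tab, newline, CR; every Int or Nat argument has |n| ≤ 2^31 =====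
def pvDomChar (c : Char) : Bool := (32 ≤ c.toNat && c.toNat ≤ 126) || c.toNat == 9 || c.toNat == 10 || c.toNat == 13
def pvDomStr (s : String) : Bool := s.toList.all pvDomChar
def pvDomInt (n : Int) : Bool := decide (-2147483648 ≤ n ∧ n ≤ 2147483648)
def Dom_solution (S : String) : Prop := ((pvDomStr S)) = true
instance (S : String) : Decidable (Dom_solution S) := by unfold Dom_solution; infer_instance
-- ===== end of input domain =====

-- B replaces A's dual open/closed counters with a break by a one-shot bracket-position
-- table and a single lookup (objective: simpler).

-- ===== PORT A =====
-- A's second loop: iterate over the characters carrying the Python index,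
-- openCount and closedCount; break (return index+1) when openCount == closedCount;
-- if the loop exhausts, the Python 'index' variable is the last index, so return idx
-- (= initial idx + length = last index + 1).
def pvLoopA : List Char → Int → Int → Int → Int
  | [], idx, _o, _c => idx
  | ch :: rest, idx, o, c =>
    let o' := if ch = '(' then o + 1 else o
    let c' := if ch ≠ '(' ∧ ch = ')' then c - 1 else c
    if o' = c' then idx + 1 else pvLoopA rest (idx + 1) o' c'

def solution (S : String) : Int :=
  if PySem.Str.len S = 0 then 0
  else
    let closedCount : Int :=
      S.toList.foldl (fun cc i => if i = ')' then cc + 1 else cc) 0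
    if closedCount = 0 ∧ PySem.Str.len S ≠ 0 then 0
    else pvLoopA S.toList 0 0 closedCount

-- ===== PORT B =====
def solution_alt (S : String) : Int :=
  let T : Int := (PySem.Str.count S ")" : Int)
  if T = 0 then 0
  else
    let pos : List Int :=
      ((PySem.List.enumerate S.toList 0).filter
        (fun p => p.2 = '(' || p.2 = ')')).map (·.1)
    -- pos[T-1]: always in range here (T ≥ 1 and pos holds at least T indices)
    PySem.List.pyGetD pos (T - 1) 0 + 1

-- ===== PRECONDITION & SPEC =====
def Spec_solution (S : String) (out : Int) : Prop := out = solution_alt S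
instance (S : String) (out : Int) : Decidable (Spec_solution S out) := by unfold Spec_solution; infer_instance

-- ===== CLAIM (what is proved, stated in full; the proofs are below) =====
def Claim_equal_solution : Prop := ∀ (S : String), Dom_solution S → Spec_solution S (solution S)

-- ===== LEMMAS AND PROOFS =====

def pvIsBr (c : Char) : Bool := c = '(' || c = ')'

-- Chars.count for a single-character needle is List.count
theorem pvCountGo_singleton (c : Char) :
    ∀ (fuel : Nat) (l : List Char) (acc : Nat), l.length ≤ fuel →
      PySem.Chars.count.go [c] fuel l acc = acc + l.count c := by
  intro fuel
  induction fuel with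
  | zero =>
    intro l acc h
    cases l with
    | nil => simp [PySem.Chars.count.go]
    | cons a t => simp at h
  | succ n ih =>
    intro l acc h
    cases l with
    | nil => simp [PySem.Chars.count.go]
    | cons a t =>
      simp only [PySem.Chars.count.go]
      have hp : ([c].isPrefixOf (a :: t)) = (c == a) := by simp [List.isPrefixOf]
      rw [hp]
      by_cases hc : c = a
      · subst hc
        simp only [beq_self_eq_true, if_true, List.length_singleton, List.drop_succ_cons,
          List.length_nil, List.drop_zero]
        rw [ih t (acc + 1) (by simpa using Nat.le_of_succ_le_succ h)]
        simp [List.count_cons]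
        omega
      · have : (c == a) = false := by simp [hc]
        rw [this]
        simp only [Bool.false_eq_true, if_false]
        rw [ih t acc (by simpa using Nat.le_of_succ_le_succ h)]
        simp [Ne.symm hc]

theorem pvCount_singleton (l : List Char) (c : Char) :
    PySem.Chars.count l [c] = l.count c := by
  simp only [PySem.Chars.count, List.isEmpty_cons, Bool.false_eq_true, if_false]
  simpa using pvCountGo_singleton c l.length l 0 (le_refl _)

-- A's first-pass fold is the ')' count
theorem pvFold_count (l : List Char) :
    l.foldl (fun cc i => if i = ')' then cc + 1 else cc) (0 : Int) = (l.count ')' : Int) := by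
  have := PySem.List.foldl_count_if (fun i : Char => i = ')') l 0
  simpa [List.count_eq_countP] using this

-- the core loop/table correspondence: A's loop breaks exactly at the k-th bracket
-- character (k = closedCount - openCount), whose index B reads off its position table
theorem pvLoop_eq_table (l : List Char) :
    ∀ (s o c : Int) (k : Nat), c - o = (k : Int) → 1 ≤ k →
      k ≤ (l.filter (fun ch => pvIsBr ch)).length →
      pvLoopA l s o c =
        ((((PySem.List.enumerate l s).filter (fun p => pvIsBr p.2)).map (·.1)).getD (k - 1) 0) + 1 := by
  induction l with
  | nil => intro s o c k hk h1 h2; simp at h2; omega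
  | cons ch rest ih =>
    intro s o c k hk h1 h2
    rw [PySem.List.enumerate_cons]
    by_cases hbr : pvIsBr ch = true
    · have hd : ch = '(' ∨ ch = ')' := by simpa [pvIsBr] using hbr
      -- bracket character: either break (k = 1) or continue with k-1
      have hoc : (if ch = '(' then o + 1 else o) = (if ch ≠ '(' ∧ ch = ')' then c - 1 else c)
          ↔ k = 1 := by
        rcases hd with h | h
        · simp [h]; omega
        · have he : ¬ ch = '(' := by rw [h]; decide
          simp [h]; omega
      simp only [pvLoopA]
      by_cases hk1 : k = 1
      · rw [if_pos (hoc.mpr hk1)]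
        subst hk1
        simp [hbr]
      · rw [if_neg (fun hh => hk1 (hoc.mp hh))]
        have h2' : k - 1 ≤ (rest.filter (fun ch => pvIsBr ch)).length := by
          simp [hbr] at h2; omega
        have hknew : (if ch ≠ '(' ∧ ch = ')' then c - 1 else c) - (if ch = '(' then o + 1 else o)
            = ((k - 1 : Nat) : Int) := by
          rcases hd with h | h
          · simp [h]; omega
          · have he : ¬ ch = '(' := by rw [h]; decide
            simp [h, he]; omega
        rw [ih (s + 1) _ _ (k - 1) hknew (by omega) h2']
        simp only [List.filter_cons, hbr, if_true, List.map_cons]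
        have e : k - 1 - 1 = k - 2 := by omega
        rw [e, show k - 1 = (k - 2) + 1 from by omega, List.getD_cons_succ]
    · -- non-bracket character: counters unchanged, no break (k ≥ 1 > 0)
      have h1' : ¬ ch = '(' := by intro h; apply hbr; unfold pvIsBr; simp [h]
      have h2c : ¬ ch = ')' := by intro h; apply hbr; unfold pvIsBr; simp [h]
      have hno : ¬ ((if ch = '(' then o + 1 else o) = (if ch ≠ '(' ∧ ch = ')' then c - 1 else c)) := by
        simp [h1', h2c]; omega
      simp only [pvLoopA, if_neg hno]
      rw [ih (s + 1) _ _ k (by simp [h1', h2c]; omega) h1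
        (by simpa [List.filter_cons, hbr] using h2)]
      simp [hbr]

theorem pvCount_le_brackets (l : List Char) :
    l.count ')' ≤ (l.filter (fun ch => pvIsBr ch)).length := by
  rw [List.count_eq_countP, ← List.countP_eq_length_filter]
  apply List.countP_mono_left
  intro a _ h
  unfold pvIsBr
  simp only [beq_iff_eq] at h
  simp [h]

-- ===== VERDICT (by name: the statement is the Claim_ definition above) =====
theorem solution_spec : Claim_equal_solution := by
  intro S _
  unfold Spec_solution
  have hcnt : PySem.Str.count S ")" = S.toList.count ')' := by
    rw [PySem.Str.count_eq]; exact pvCount_singleton S.toList ')'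
  by_cases hT : S.toList.count ')' = 0
  · by_cases hnil : S.toList = []
    · have h0 : S = "" := String.toList_eq_nil_iff.mp hnil
      simp [solution, solution_alt, h0]
    · have hS : S ≠ "" := fun h => hnil (by rw [h]; rfl)
      simp [solution, solution_alt, hS, pvFold_count, pvCount_singleton, hT]
  · have hnil : S.toList ≠ [] := fun h => hT (by rw [h]; rfl)
    have hS : S ≠ "" := fun h => hnil (by rw [h]; rfl)
    have hA : solution S = pvLoopA S.toList 0 0 ((S.toList.count ')' : Nat) : Int) := by
      simp [solution, hS, pvFold_count, hT]
    rw [hA, pvLoop_eq_table S.toList 0 0 ((S.toList.count ')' : Nat) : Int) (S.toList.count ')') (by omega) (by omega)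
      (pvCount_le_brackets S.toList)]
    have hB : solution_alt S =
        PySem.List.pyGetD
          (((PySem.List.enumerate S.toList 0).filter (fun p => pvIsBr p.2)).map (·.1))
          ((S.toList.count ')' : Int) - 1) 0 + 1 := by
      simp [solution_alt, pvCount_singleton, hT, pvIsBr]
    rw [hB, show ((S.toList.count ')' : Int) - 1) = (((S.toList.count ')' - 1 : Nat)) : Int) from by
      omega, PySem.List.pyGetD_natCast]
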